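-- pv_equiv track=rewrite | github.com/spegesilden/projecteuler | e37/TruncatablePrimes.py | tRight
-- ===== SOURCE A (Python) =====
-- def tRight(n):
--     s = str(n)[::-1]
--     truncated = []
--
--     for i in range(len(s)):
--         tmp = ''
--         for j in range(i+1):
--             tmp += s[j]
--         r = tmp[::-1]
--         truncated.append(int(r))
--
--     return truncated
-- ===== SOURCE B (Python) =====
-- def tRight(n):
--     res = []
--     cur = ''
--     for ch in reversed(str(n)):
--         cur = ch + cur
--         res.append(int(cur))
--     return res
-- ===== Notes on version B (the rewrite author's own statement) =====
-- stated objective: simpler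
-- what changed: Replaces A's nested loop (for each i, rebuild the suffix character by character from the reversed string and reverse it back) with a single right-to-left pass that prepends each character to an accumulator string and appends its int value.
import Mathlib
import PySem

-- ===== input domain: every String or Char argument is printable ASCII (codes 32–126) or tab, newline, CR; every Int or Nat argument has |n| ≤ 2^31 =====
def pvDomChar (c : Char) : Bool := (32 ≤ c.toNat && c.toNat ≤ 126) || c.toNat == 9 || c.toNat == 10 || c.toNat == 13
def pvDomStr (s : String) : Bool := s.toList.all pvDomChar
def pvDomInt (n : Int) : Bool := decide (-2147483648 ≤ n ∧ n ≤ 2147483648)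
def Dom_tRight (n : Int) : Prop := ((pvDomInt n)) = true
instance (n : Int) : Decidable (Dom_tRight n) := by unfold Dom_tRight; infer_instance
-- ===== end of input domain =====

-- B replaces A's nested rebuild-each-suffix loop by a single right-to-left pass that
-- prepends each character to an accumulator string (objective: simpler, same result).

-- ===== PORT A =====
-- A: s = str(n)[::-1]; for i in range(len(s)): tmp built char by char from s[0..i],
-- r = tmp[::-1], append int(r).  int() can never fail here, so `.getD 0` is never hit.
def tRight (n : Int) : List Int :=
  let s : List Char := (PySem.List.slice? (PySem.Int.toChars n) none none (-1)).getD []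
  (PySem.List.pyRange 0 (s.length : Int) 1).foldl
    (fun truncated i =>
      let tmp : List Char :=
        (PySem.List.pyRange 0 (i + 1) 1).foldl
          (fun tmp j => tmp ++ [PySem.List.pyGetD s j ' ']) []
      let r := (PySem.List.slice? tmp none none (-1)).getD []
      truncated ++ [(PySem.Int.ofChars? r).getD 0])
    []

-- ===== PORT B =====
-- B: cur = ''; for ch in reversed(str(n)): cur = ch + cur; res.append(int(cur))
def tRight_alt (n : Int) : List Int :=
  ((PySem.Int.toChars n).reverse.foldl
    (fun (st : List Char × List Int) ch =>
      let cur := ch :: st.1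
      (cur, st.2 ++ [(PySem.Int.ofChars? cur).getD 0]))
    ([], [])).2

-- ===== PRECONDITION & SPEC =====
def Spec_tRight (n : Int) (out : List Int) : Prop := out = tRight_alt n
instance (n : Int) (out : List Int) : Decidable (Spec_tRight n out) := by unfold Spec_tRight; infer_instance

-- ===== CLAIM (what is proved, stated in full; the proofs are below) =====
def Claim_equal_tRight : Prop := ∀ (n : Int), Dom_tRight n → Spec_tRight n (tRight n)

-- ===== LEMMAS AND PROOFS =====

-- A's inner loop rebuilds the prefix s[0..i] by indexing; as a list it is `take`.
theorem map_getD_range_eq_take {α : Type} (t : List α) (d : α) (k : Nat) (h : k ≤ t.length) :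
    (List.range k).map (fun j => t.getD j d) = t.take k := by
  apply List.ext_getElem
  · simp [Nat.min_eq_left h]
  · intro i h1 h2
    simp only [List.getElem_map, List.getElem_range, List.getElem_take]
    rw [List.getD_eq_getElem]

-- B's loop invariant: after folding over u with accumulator (cur, acc), the output list is
-- acc followed by g applied to each successive prepend-extension of cur.
theorem tRight_alt_invariant (g : List Char → Int) (u cur : List Char) (acc : List Int) :
    (u.foldl (fun (st : List Char × List Int) ch =>
        let c := ch :: st.1
        (c, st.2 ++ [g c])) (cur, acc)).2
      = acc ++ (List.range u.length).map (fun i => g ((u.take (i + 1)).reverse ++ cur)) := by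
  induction u generalizing cur acc with
  | nil => simp
  | cons ch u ih =>
      simp only [List.foldl_cons, ih, List.length_cons, List.range_succ_eq_map,
        List.map_cons, List.map_map]
      simp [List.append_assoc, Function.comp_def]

-- Both programs compute map (fun i => int-of ((reverse str(n)).take (i+1)).reverse).
theorem tRight_eq_alt (n : Int) : tRight n = tRight_alt n := by
  unfold tRight tRight_alt
  rw [PySem.List.slice?_none_none_neg_one]
  simp only [Option.getD_some]
  set t := PySem.Int.toChars n with ht
  rw [tRight_alt_invariant (fun cur => (PySem.Int.ofChars? cur).getD 0) t.reverse [] []]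
  rw [show ((t.reverse.length : Nat) : Int) = ((t.reverse.length : Nat) : Int) from rfl,
    PySem.List.pyRange_zero_nat, List.foldl_map,
    PySem.List.foldl_append_singleton_eq_map, List.nil_append, List.nil_append]
  apply List.map_congr_left
  intro i hi
  simp only [List.mem_range] at hi
  have h1 : ((i : Int) + 1) = ((i + 1 : Nat) : Int) := by push_cast; ring
  rw [h1, PySem.List.pyRange_zero_nat, PySem.List.foldl_append_singleton_eq_map,
    List.nil_append, List.map_map]
  rw [show (List.range (i + 1)).map ((fun j => PySem.List.pyGetD t.reverse j ' ') ∘ fun k : Nat => (k : Int))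
      = (List.range (i + 1)).map (fun j => t.reverse.getD j ' ') from
    List.map_congr_left (fun j _ => by simp [Function.comp, PySem.List.pyGetD_natCast])]
  rw [map_getD_range_eq_take t.reverse ' ' (i + 1) (by omega),
    PySem.List.slice?_none_none_neg_one]
  simp

-- ===== VERDICT (by name: the statement is the Claim_ definition above) =====
theorem tRight_spec : Claim_equal_tRight := by
  intro n _
  unfold Spec_tRight
  exact tRight_eq_alt n
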